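-- pv_equiv track=rewrite | github.com/Praetorian-Defence/praetorian-api | apps/core/services/clean_log.py | _remove_prefix_and_substring
-- ===== SOURCE A (Python) =====
-- def _remove_prefix_and_substring(main_string, to_find):
--     """
--     Remove the character immediately before the substring
--     """
--     output = []
--     i = 0
--     n = len(main_string)
--     m = len(to_find)
--
--     while i < n:
--         if i > 0 and main_string[i:i + m] == to_find:
--             output.pop()
--             i += m  # Skip the length of to_find
--         else:
--             output.append(main_string[i])
--             i += 1
--
--     return ''.join(output)
-- ===== SOURCE B (Python) =====
-- def _remove_prefix_and_substring(main_string, to_find):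
--     """
--     Remove the character immediately before the substring
--     """
--     out = []
--     i = 0
--     n = len(main_string)
--     m = len(to_find)
--     while i < n:
--         j = main_string.find(to_find, max(i, 1))
--         if j == -1:
--             out.extend(main_string[i:])
--             break
--         out.extend(main_string[i:j])
--         out.pop()
--         i = j + m
--     return ''.join(out)
-- ===== Notes on version B (the rewrite author's own statement) =====
-- stated objective: faster
-- what changed: B jumps straight between occurrences with str.find and appends whole slices in bulk (popping one char per hit), instead of A's comparing a freshly built m-character slice against to_find at every single index.
-- outside the precondition, e.g. on _remove_prefix_and_substring('a', ''): A returns 'a', B returns ''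
import Mathlib
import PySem

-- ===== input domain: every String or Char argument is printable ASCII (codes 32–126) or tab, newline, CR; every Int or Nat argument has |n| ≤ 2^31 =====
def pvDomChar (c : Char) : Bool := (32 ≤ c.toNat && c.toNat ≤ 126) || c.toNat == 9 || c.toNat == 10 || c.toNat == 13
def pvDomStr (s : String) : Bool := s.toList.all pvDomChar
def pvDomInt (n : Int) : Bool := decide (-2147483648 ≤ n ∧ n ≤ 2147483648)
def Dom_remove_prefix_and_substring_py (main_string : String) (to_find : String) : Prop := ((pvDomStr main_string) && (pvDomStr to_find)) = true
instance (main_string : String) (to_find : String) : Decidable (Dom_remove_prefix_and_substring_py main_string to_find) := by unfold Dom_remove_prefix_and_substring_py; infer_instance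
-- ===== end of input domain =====

-- B replaces A's per-index m-character slice comparison by str.find jumps and bulk slice appends
-- (same return value; both A and B raise IndexError on exactly the same pop-underflow inputs, excluded by Pre_).

-- ===== PORT A =====
-- A's while-loop: i rises by at least 1 per iteration (to_find ≠ "" inside Pre_), so fuel n+1 suffices;
-- output.pop() is dropLast (Python raises on empty output — those inputs are outside Pre_);
-- main_string[i:i+m] is PySem.List.slice; main_string[i] (in range, i < n) is appended as the 1-element slice (cs.drop i).take 1.
def pvAloop (cs t : List Char) (i : Nat) (output : List Char) : Nat → List Char
  | 0 => output
  | fuel + 1 =>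
    if i < cs.length then
      if 0 < i ∧ PySem.List.slice cs (some (i : Int)) (some ((i + t.length : Nat) : Int)) = t then
        pvAloop cs t (i + t.length) output.dropLast fuel
      else
        pvAloop cs t (i + 1) (output ++ (cs.drop i).take 1) fuel
    else output

def remove_prefix_and_substring_py (main_string : String) (to_find : String) : String :=
  String.ofList (pvAloop main_string.toList to_find.toList 0 [] (main_string.toList.length + 1))

-- ===== PORT B =====
-- Source B's while-loop: j = main_string.find(to_find, max(i, 1)) is PySem.Chars.findFrom; on a hit the
-- slice main_string[i:j] is appended in bulk, one char popped (dropLast), and i jumps to j + m.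
def pvBloop (cs t : List Char) (i : Nat) (out : List Char) : Nat → List Char
  | 0 => out
  | fuel + 1 =>
    if i < cs.length then
      let j : Int := PySem.Chars.findFrom cs t ((max i 1 : Nat) : Int)
      if j = -1 then
        out ++ cs.drop i
      else
        pvBloop cs t (j.toNat + t.length)
          ((out ++ PySem.List.slice cs (some (i : Int)) (some j)).dropLast) fuel
    else out

def remove_prefix_and_substring_py_alt (main_string : String) (to_find : String) : String :=
  String.ofList (pvBloop main_string.toList to_find.toList 0 [] (main_string.toList.length + 1))

-- ===== PRECONDITION & SPEC =====
-- The greedy non-overlapping occurrences of t in cs searched from position 1 (exactly the matches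
-- both Pythons act on): structural scan over the characters, `skip` counts positions still covered
-- by the previous occurrence.
def pvOccAux (t : List Char) : List Char → Nat → Nat → List Nat
  | [], _, _ => []
  | c :: rest, pos, 0 =>
    if 0 < pos ∧ t <+: (c :: rest) then pos :: pvOccAux t rest (pos + 1) (t.length - 1)
    else pvOccAux t rest (pos + 1) 0
  | _ :: rest, pos, skip + 1 => pvOccAux t rest (pos + 1) skip

def pvGreedyOccs (cs t : List Char) : List Nat := pvOccAux t cs 0 0

-- Pre_ excludes exactly (a) to_find = "", where A raises IndexError whenever len(main_string) ≥ 2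
-- and on the remaining degenerate inputs (len ≤ 1) returns main_string while B returns "" (see cite),
-- and (b) the pop-underflow inputs, where BOTH A and B raise IndexError: the pop underflows iff the
-- idx-th greedy occurrence (0-based) starts at position ≤ idx·(len(to_find)+1), i.e. too few free
-- characters precede it; outside this bound neither Python returns.
def Pre_remove_prefix_and_substring_py (main_string : String) (to_find : String) : Prop :=
  to_find ≠ "" ∧
    ((pvGreedyOccs main_string.toList to_find.toList).zipIdx.all
      (fun pi => decide (pi.2 * (to_find.toList.length + 1) < pi.1))) = true
instance (main_string : String) (to_find : String) : Decidable (Pre_remove_prefix_and_substring_py main_string to_find) := by unfold Pre_remove_prefix_and_substring_py; infer_instance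

def pvWitness_remove_prefix_and_substring_py : String × String := ("xabcx", "b")

def Spec_remove_prefix_and_substring_py (main_string : String) (to_find : String) (out : String) : Prop := out = remove_prefix_and_substring_py_alt main_string to_find
instance (main_string : String) (to_find : String) (out : String) : Decidable (Spec_remove_prefix_and_substring_py main_string to_find out) := by unfold Spec_remove_prefix_and_substring_py; infer_instance

-- ===== CLAIM (what is proved, stated in full; the proofs are below) =====
def Claim_equal_remove_prefix_and_substring_py : Prop := ∀ (main_string : String) (to_find : String), Dom_remove_prefix_and_substring_py main_string to_find → Pre_remove_prefix_and_substring_py main_string to_find → Spec_remove_prefix_and_substring_py main_string to_find (remove_prefix_and_substring_py main_string to_find)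

-- ===== LEMMAS AND PROOFS =====

-- Common reference loop: A's scan with the match test phrased as a prefix relation.
-- (The match step advances by max t.length 1 so the recursion terminates for every t;
--  for t ≠ [] this is exactly t.length, and for t = [] the match test never fires anyway.)
def pvS (cs t : List Char) (i : Nat) (out : List Char) : List Char :=
  if _h : i < cs.length then
    if 0 < i ∧ t <+: cs.drop i then
      pvS cs t (i + max t.length 1) out.dropLast
    else
      pvS cs t (i + 1) (out ++ (cs.drop i).take 1)
  else out
termination_by cs.length - i
decreasing_by all_goals omega

lemma pvA_eq_S (cs t : List Char) (ht : t ≠ []) :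
    ∀ fuel i out, cs.length - i < fuel → pvAloop cs t i out fuel = pvS cs t i out := by
  intro fuel
  induction fuel with
  | zero => intro i out h; omega
  | succ f ih =>
    intro i out h
    simp only [pvAloop]
    rw [pvS]
    by_cases hi : i < cs.length
    · rw [if_pos hi, dif_pos hi]
      have hslice : PySem.List.slice cs (some (i : Int)) (some ((i + t.length : Nat) : Int))
          = (cs.drop i).take t.length := by
        rw [PySem.List.slice_natCast]; congr 1; omega
      have hlen : 0 < t.length := List.length_pos_iff.mpr ht
      by_cases hc : 0 < i ∧ t <+: cs.drop i
      · have hA : 0 < i ∧ PySem.List.slice cs (some (i : Int)) (some ((i + t.length : Nat) : Int)) = t :=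
          ⟨hc.1, by rw [hslice]; exact (List.prefix_iff_eq_take.mp hc.2).symm⟩
        rw [if_pos hA, if_pos hc]
        have hmax : max t.length 1 = t.length := by omega
        rw [hmax]
        exact ih (i + t.length) out.dropLast (by omega)
      · have hA : ¬ (0 < i ∧ PySem.List.slice cs (some (i : Int)) (some ((i + t.length : Nat) : Int)) = t) := by
          rintro ⟨h1, h2⟩
          exact hc ⟨h1, by rw [hslice] at h2; exact List.prefix_iff_eq_take.mpr h2.symm⟩
        rw [if_neg hA, if_neg hc]
        exact ih (i + 1) _ (by omega)
    · rw [if_neg hi, dif_neg hi]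

-- a prefix of a later suffix is an infix of an earlier suffix
lemma pv_prefix_drop_infix {t cs : List Char} {a k : Nat} (hk : a ≤ k)
    (h : t <+: cs.drop k) : t <:+: cs.drop a := by
  have : cs.drop k = (cs.drop a).drop (k - a) := by
    rw [List.drop_drop]; congr 1; omega
  rw [this] at h
  exact h.isInfix.trans (List.drop_suffix _ _).isInfix

-- an infix of a later suffix is an infix of an earlier one
lemma pv_infix_drop_mono {t cs : List Char} {a b : Nat} (hab : a ≤ b)
    (h : t <:+: cs.drop b) : t <:+: cs.drop a := by
  have hd : (cs.drop a).drop (b - a) = cs.drop b := by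
    rw [List.drop_drop]; congr 1; omega
  rw [← hd] at h
  exact h.trans (List.drop_suffix _ _).isInfix

lemma pvS_noMatch (cs t : List Char) :
    ∀ fuel i out, cs.length - i < fuel → ¬ t <:+: cs.drop (max i 1) →
      pvS cs t i out = out ++ cs.drop i := by
  intro fuel
  induction fuel with
  | zero => intro i out h _; omega
  | succ f ih =>
    intro i out h hno
    rw [pvS]
    by_cases hi : i < cs.length
    · have hnc : ¬ (0 < i ∧ t <+: cs.drop i) := by
        rintro ⟨h1, h2⟩
        exact hno (pv_prefix_drop_infix (by omega) h2)
      rw [dif_pos hi, if_neg hnc]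
      rw [ih (i + 1) _ (by omega) (fun hinf => hno (pv_infix_drop_mono (by omega) hinf))]
      rw [List.append_assoc]
      congr 1
      have hd : cs.drop (i + 1) = (cs.drop i).drop 1 := by rw [List.drop_drop]
      rw [hd, List.take_append_drop]
    · rw [dif_neg hi]
      have hd : cs.drop i = [] := List.drop_eq_nil_of_le (by omega)
      rw [hd, List.append_nil]

lemma pvS_advance (cs t : List Char) (ht : t ≠ []) :
    ∀ fuel i j out, i ≤ j → max i 1 ≤ j → t <+: cs.drop j →
      (∀ k, max i 1 ≤ k → k < j → ¬ t <+: cs.drop k) → j - i < fuel →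
      pvS cs t i out = pvS cs t (j + t.length) ((out ++ (cs.drop i).take (j - i)).dropLast) := by
  intro fuel
  induction fuel with
  | zero => intro i j out _ _ _ _ h; omega
  | succ f ih =>
    intro i j out hij hmax hpre hmin hf
    have hlen : 0 < t.length := List.length_pos_iff.mpr ht
    have hjlen : j < cs.length := by
      have h1 := hpre.length_le
      rw [List.length_drop] at h1
      omega
    by_cases heq : i = j
    · subst heq
      rw [pvS, dif_pos hjlen, if_pos ⟨by omega, hpre⟩]
      have hmx : max t.length 1 = t.length := by omega
      rw [hmx]
      simp
    · have hlt : i < j := by omega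
      rw [pvS, dif_pos (by omega : i < cs.length)]
      have hnc : ¬ (0 < i ∧ t <+: cs.drop i) := by
        rintro ⟨h1, h2⟩
        exact hmin i (by omega) hlt h2
      rw [if_neg hnc]
      rw [ih (i + 1) j _ (by omega) (by omega) hpre
        (fun k hk hkj => hmin k (by omega) hkj) (by omega)]
      congr 1
      rw [List.append_assoc]
      congr 1
      have hd : cs.drop (i + 1) = (cs.drop i).drop 1 := by rw [List.drop_drop]
      have hs : j - i = 1 + (j - (i + 1)) := by omega
      rw [hd, hs, List.take_add]

lemma pvB_eq_S (cs t : List Char) (ht : t ≠ []) :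
    ∀ fuel i out, cs.length - i < fuel → pvBloop cs t i out fuel = pvS cs t i out := by
  intro fuel
  induction fuel with
  | zero => intro i out h; omega
  | succ f ih =>
    intro i out hf
    simp only [pvBloop]
    by_cases hi : i < cs.length
    · rw [if_pos hi]
      have hk : max i 1 ≤ cs.length := by omega
      by_cases hj : PySem.Chars.findFrom cs t ((max i 1 : Nat) : Int) = -1
      · rw [if_pos hj]
        have hno : ¬ t <:+: cs.drop (max i 1) :=
          (PySem.Chars.findFrom_natCast_eq_neg_one_iff cs t (max i 1) hk).mp hj
        exact (pvS_noMatch cs t (cs.length - i + 1) i out (by omega) hno).symm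
      · rw [if_neg hj]
        obtain ⟨hge, hpref, hmin⟩ := PySem.Chars.findFrom_natCast_spec cs t (max i 1) hk hj
        have hnn : (0 : Int) ≤ PySem.Chars.findFrom cs t ((max i 1 : Nat) : Int) := by
          have : (0 : Int) ≤ ((max i 1 : Nat) : Int) := by positivity
          omega
        obtain ⟨J, hJ⟩ : ∃ J : Nat, PySem.Chars.findFrom cs t ((max i 1 : Nat) : Int) = (J : Int) :=
          ⟨_, (Int.toNat_of_nonneg hnn).symm⟩
        rw [hJ] at hge hpref hmin ⊢
        simp only [Int.toNat_natCast] at hpref hmin ⊢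
        have hgeN : max i 1 ≤ J := by exact_mod_cast hge
        rw [PySem.List.slice_natCast]
        rw [ih (J + t.length) _ (by have := List.length_pos_iff.mpr ht; omega)]
        exact (pvS_advance cs t ht (J - i + 1) i J out (by omega) hgeN hpref hmin (by omega)).symm
    · rw [if_neg hi, pvS, dif_neg hi]

-- ===== VERDICT (by name: the statement is the Claim_ definition above) =====
theorem remove_prefix_and_substring_py_spec : Claim_equal_remove_prefix_and_substring_py := by
  intro s t _ hpre
  unfold Spec_remove_prefix_and_substring_py
  have ht : t.toList ≠ [] := by
    intro h; exact hpre.1 (String.toList_eq_nil_iff.mp h)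
  unfold remove_prefix_and_substring_py remove_prefix_and_substring_py_alt
  rw [pvA_eq_S _ _ ht _ 0 [] (by omega), pvB_eq_S _ _ ht _ 0 [] (by omega)]
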